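-- pv_equiv track=rewrite | github.com/rsarwas/aoc | 2021-12/answers.py | adjacent_nodes2
-- ===== SOURCE A (Python) =====
-- def is_big(s):
--     return s[0] in "ABCDEFGHIJKLMNOPQRSTUVWXY"
--
-- def adjacent_nodes2(path, edges, has_double):
--     # return a list of (nodes,bool), which are the other end of all edges
--     # that have the last node in path at an end, and if this adds a double small cave
--     # skip the small nodes if they are already in the path
--     # EXCEPT: 1 small cave can be visited twice (all other small caves can only be visited once)
--     #         small caves "start", "end" can only be visited once
--     adjacent = []
--     node = path[-1]
--     for edge in edges:
--         end = None
--         if edge[0] == node: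
--             end = edge[1]
--         if edge[1] == node:
--             end = edge[0]
--         if end is None:
--             continue
--         if end == "start":
--             continue
--         if is_big(end):
--             adjacent.append((end, has_double))
--         else:
--             if end not in path:
--                 adjacent.append((end, has_double))
--             else:
--                 if not has_double:
--                     adjacent.append((end, True))
--     return adjacent
-- ===== SOURCE B (Python) =====
-- def is_big(s):
--     return s[0] in "ABCDEFGHIJKLMNOPQRSTUVWXY"
--
-- def adjacent_nodes2(path, edges, has_double):
--     # Build an adjacency index once, then filter the last node's neighbor list.
--     graph = {}
--     for a, b in edges:
--         graph.setdefault(a, []).append(b)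
--         if a != b:
--             graph.setdefault(b, []).append(a)
--     node = path[-1]
--     adjacent = []
--     for end in graph.get(node, []):
--         if end == "start":
--             continue
--         if is_big(end):
--             adjacent.append((end, has_double))
--         elif end not in path:
--             adjacent.append((end, has_double))
--         elif not has_double:
--             adjacent.append((end, True))
--     return adjacent
-- ===== Notes on version B (the rewrite author's own statement) =====
-- stated objective: idiomatic
-- what changed: B builds an adjacency dict in one pass over the edges (appending a self-loop neighbor once) and then filters only the last node's neighbor list, instead of A's per-call scan of every edge with inline end-point matching.
import Mathlib
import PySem

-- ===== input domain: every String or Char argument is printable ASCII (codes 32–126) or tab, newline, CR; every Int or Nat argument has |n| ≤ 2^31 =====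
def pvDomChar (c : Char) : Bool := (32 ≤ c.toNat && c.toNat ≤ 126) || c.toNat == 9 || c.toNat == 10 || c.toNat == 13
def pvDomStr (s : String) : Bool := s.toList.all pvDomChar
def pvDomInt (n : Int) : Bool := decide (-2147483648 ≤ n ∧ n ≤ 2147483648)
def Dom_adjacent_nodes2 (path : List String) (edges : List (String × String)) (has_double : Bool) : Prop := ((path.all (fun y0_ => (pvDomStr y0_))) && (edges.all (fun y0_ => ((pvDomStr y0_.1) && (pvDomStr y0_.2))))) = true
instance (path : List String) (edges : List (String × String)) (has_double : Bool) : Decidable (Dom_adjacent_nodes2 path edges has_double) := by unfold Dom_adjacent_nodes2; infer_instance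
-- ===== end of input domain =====

-- B builds the adjacency index once and filters only the last node's neighbor list (idiomatic restructuring; same complexity).

-- ===== PORT A =====
-- is_big(s) = s[0] in "ABC…Y"; the empty-string case (IndexError in Python) is excluded by Pre_, the 'false' default is unreached there
def is_big (s : String) : Bool :=
  match s.toList with
  | [] => false
  | c :: _ => ("ABCDEFGHIJKLMNOPQRSTUVWXY".toList).contains c

def adjacent_nodes2 (path : List String) (edges : List (String × String)) (has_double : Bool) : List (String × Bool) :=
  match path.getLast? with
  | none => []   -- path[-1] raises IndexError in Python; excluded by Pre_
  | some node =>
    edges.foldl (fun adjacent edge =>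
      -- end := None; if edge[0]==node: end := edge[1]; if edge[1]==node: end := edge[0]
      let e : Option String :=
        if edge.2 = node then some edge.1
        else if edge.1 = node then some edge.2
        else none
      match e with
      | none => adjacent
      | some en =>
        if en = "start" then adjacent
        else if is_big en then adjacent ++ [(en, has_double)]
        else if ¬ (en ∈ path) then adjacent ++ [(en, has_double)]
        else if ¬ has_double then adjacent ++ [(en, true)]
        else adjacent) []

-- ===== PORT B =====
-- one edge of the graph-building loop: graph.setdefault(a,[]).append(b); if a != b: graph.setdefault(b,[]).append(a)
def stepG (g : PySem.Dict String (List String)) (e : String × String) : PySem.Dict String (List String) :=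
  let g := g.insert e.1 (g.getD e.1 [] ++ [e.2])
  if e.1 ≠ e.2 then g.insert e.2 (g.getD e.2 [] ++ [e.1]) else g

def buildGraph (edges : List (String × String)) : PySem.Dict String (List String) :=
  edges.foldl stepG PySem.Dict.empty

def adjacent_nodes2_alt (path : List String) (edges : List (String × String)) (has_double : Bool) : List (String × Bool) :=
  let graph := buildGraph edges
  match path.getLast? with
  | none => []   -- path[-1] raises IndexError in Python; excluded by Pre_
  | some node =>
    (graph.getD node []).foldl (fun adjacent en =>
      if en = "start" then adjacent
      else if is_big en then adjacent ++ [(en, has_double)]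
      else if ¬ (en ∈ path) then adjacent ++ [(en, has_double)]
      else if ¬ has_double then adjacent ++ [(en, true)]
      else adjacent) []

-- ===== PRECONDITION & SPEC =====
-- Pre_ excludes exactly the inputs on which the Python raises IndexError: an empty path
-- (path[-1]) and edges whose matched other end is the empty string (is_big("")[0]).
def Pre_adjacent_nodes2 (path : List String) (edges : List (String × String)) (has_double : Bool) : Prop :=
  path ≠ [] ∧ ∀ e ∈ edges,
    (e.2 = path.getLastD "" → e.1 ≠ "") ∧ (e.1 = path.getLastD "" → e.2 ≠ "")
instance (path : List String) (edges : List (String × String)) (has_double : Bool) : Decidable (Pre_adjacent_nodes2 path edges has_double) := by unfold Pre_adjacent_nodes2; infer_instance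

def pvWitness_adjacent_nodes2 : List String × (List (String × String)) × Bool :=
  (["start", "b"], [("start", "b"), ("b", "end"), ("b", "A"), ("b", "b")], false)

def Spec_adjacent_nodes2 (path : List String) (edges : List (String × String)) (has_double : Bool) (out : List (String × Bool)) : Prop := out = adjacent_nodes2_alt path edges has_double
instance (path : List String) (edges : List (String × String)) (has_double : Bool) (out : List (String × Bool)) : Decidable (Spec_adjacent_nodes2 path edges has_double out) := by unfold Spec_adjacent_nodes2; infer_instance

-- ===== CLAIM (what is proved, stated in full; the proofs are below) =====
def Claim_equal_adjacent_nodes2 : Prop := ∀ (path : List String) (edges : List (String × String)) (has_double : Bool), Dom_adjacent_nodes2 path edges has_double → Pre_adjacent_nodes2 path edges has_double → Spec_adjacent_nodes2 path edges has_double (adjacent_nodes2 path edges has_double)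

-- ===== LEMMAS AND PROOFS =====

-- the "end" of an edge relative to node, as A computes it
def endOf (node : String) (e : String × String) : Option String :=
  if e.2 = node then some e.1
  else if e.1 = node then some e.2
  else none

-- the per-neighbor filter step shared by both loops
def step (path : List String) (has_double : Bool) (adjacent : List (String × Bool)) (en : String) : List (String × Bool) :=
  if en = "start" then adjacent
  else if is_big en then adjacent ++ [(en, has_double)]
  else if ¬ (en ∈ path) then adjacent ++ [(en, has_double)]
  else if ¬ has_double then adjacent ++ [(en, true)]
  else adjacent

-- A's fold over edges is the step-fold over the filterMapped end list
theorem foldA_eq (path : List String) (has_double : Bool) (node : String)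
    (edges : List (String × String)) (acc : List (String × Bool)) :
    edges.foldl (fun adjacent edge =>
      match endOf node edge with
      | none => adjacent
      | some en => step path has_double adjacent en) acc
    = (edges.filterMap (endOf node)).foldl (step path has_double) acc := by
  induction edges generalizing acc with
  | nil => rfl
  | cons e es ih =>
    simp only [List.foldl_cons, List.filterMap_cons]
    cases h : endOf node e with
    | none => simpa [h] using ih acc
    | some en => simpa [h] using ih (step path has_double acc en)

-- one building step adds exactly the edge's "end" (if any) to node's neighbor list
theorem stepG_getD (node : String) (e : String × String) (g : PySem.Dict String (List String)) :
    (stepG g e).getD node [] = g.getD node [] ++ (endOf node e).toList := by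
  obtain ⟨a, b⟩ := e
  unfold stepG endOf
  by_cases h1 : a = b <;> by_cases h2 : b = node <;> by_cases h3 : a = node <;>
    simp_all [PySem.Dict.getD_insert, eq_comm]

-- the graph built from edges: node's neighbor list = prior list ++ ends of edges
theorem buildGraph_getD_gen (node : String) (edges : List (String × String))
    (g : PySem.Dict String (List String)) :
    (edges.foldl stepG g).getD node [] = g.getD node [] ++ edges.filterMap (endOf node) := by
  induction edges generalizing g with
  | nil => simp
  | cons e es ih =>
    rw [List.foldl_cons, ih, stepG_getD]
    cases h : endOf node e <;> simp [h]

theorem buildGraph_getD (node : String) (edges : List (String × String)) :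
    (buildGraph edges).getD node [] = edges.filterMap (endOf node) := by
  unfold buildGraph
  rw [buildGraph_getD_gen]
  simp

theorem A_eq (path : List String) (edges : List (String × String)) (has_double : Bool)
    (node : String) (hl : path.getLast? = some node) :
    adjacent_nodes2 path edges has_double
      = (edges.filterMap (endOf node)).foldl (step path has_double) [] := by
  unfold adjacent_nodes2
  rw [hl]
  exact foldA_eq path has_double node edges []

theorem B_eq (path : List String) (edges : List (String × String)) (has_double : Bool)
    (node : String) (hl : path.getLast? = some node) :
    adjacent_nodes2_alt path edges has_double
      = ((buildGraph edges).getD node []).foldl (step path has_double) [] := by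
  unfold adjacent_nodes2_alt
  rw [hl]
  rfl

-- ===== VERDICT (by name: the statement is the Claim_ definition above) =====
theorem adjacent_nodes2_spec : Claim_equal_adjacent_nodes2 := by
  intro path edges has_double _hdom hpre
  unfold Spec_adjacent_nodes2
  obtain ⟨hne, -⟩ := hpre
  obtain ⟨node, hl⟩ := Option.isSome_iff_exists.mp (List.getLast?_isSome.mpr hne)
  rw [A_eq path edges has_double node hl, B_eq path edges has_double node hl,
      buildGraph_getD]
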